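-- pv_equiv track=rewrite | github.com/6210qwe/leetcode_py | leetcode_solutions/by_id/q1000370.py | flip_chess
-- ===== SOURCE A (Python) =====
-- from typing import List, Optional
-- from collections import deque
--
-- def flip_chess(chessboard: List[str]) -> int:
--     """
--     函数式接口 - 黑白翻转棋
--
--     实现思路:
--     BFS模拟翻转棋，尝试所有可能的落子位置。
--
--     Args:
--         chessboard: 棋盘状态
--
--     Returns:
--         最多能翻转的白棋数量
--
--     Example:
--         >>> flip_chess(["....X.","....X.","XOOO..","......","......"])
--         3
--     """
--     m, n = len(chessboard), len(chessboard[0])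
--     directions = [(-1,-1),(-1,0),(-1,1),(0,-1),(0,1),(1,-1),(1,0),(1,1)]
--     max_flip = 0
--
--     def bfs_flip(start_r: int, start_c: int) -> int:
--         """从(start_r, start_c)开始BFS翻转"""
--         board = [list(row) for row in chessboard]
--         board[start_r][start_c] = 'X'
--         queue = deque([(start_r, start_c)])
--         flip_count = 0
--
--         while queue:
--             r, c = queue.popleft()
--
--             for dr, dc in directions:
--                 # 找到连续的O
--                 path = []
--                 nr, nc = r + dr, c + dc
--
--                 while 0 <= nr < m and 0 <= nc < n and board[nr][nc] == 'O':
--                     path.append((nr, nc))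
--                     nr += dr
--                     nc += dc
--
--                 # 如果路径末端是X，则可以翻转
--                 if path and 0 <= nr < m and 0 <= nc < n and board[nr][nc] == 'X':
--                     for pr, pc in path:
--                         board[pr][pc] = 'X'
--                         flip_count += 1
--                         queue.append((pr, pc))
--
--         return flip_count
--
--     # 尝试所有空位置
--     for i in range(m):
--         for j in range(n):
--             if chessboard[i][j] == '.':
--                 max_flip = max(max_flip, bfs_flip(i, j))
--
--     return max_flip
-- ===== SOURCE B (Python) =====
-- def flip_chess(chessboard):
--     m, n = len(chessboard), len(chessboard[0])
--     directions = [(-1,-1),(-1,0),(-1,1),(0,-1),(0,1),(1,-1),(1,0),(1,1)]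
--
--     def settle(start_r, start_c):
--         placed = {(start_r, start_c)}
--         changed = True
--         while changed:
--             changed = False
--             for r in range(m):
--                 for c in range(n):
--                     if (r, c) not in placed:
--                         continue
--                     for dr, dc in directions:
--                         nr, nc = r + dr, c + dc
--                         run = []
--                         while 0 <= nr < m and 0 <= nc < n \
--                                 and chessboard[nr][nc] == 'O' and (nr, nc) not in placed:
--                             run.append((nr, nc))
--                             nr += dr
--                             nc += dc
--                         if run and 0 <= nr < m and 0 <= nc < n \
--                                 and (chessboard[nr][nc] == 'X' or (nr, nc) in placed):
--                             placed.update(run)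
--                             changed = True
--         return len(placed) - 1
--
--     best = 0
--     for i in range(m):
--         for j in range(n):
--             if chessboard[i][j] == '.':
--                 best = max(best, settle(i, j))
--     return best
-- ===== Notes on version B (the rewrite author's own statement) =====
-- stated objective: alternative
-- what changed: Replaces the per-start BFS over a mutated board copy with a deque (flip, enqueue, re-scan popped cells) by a fixpoint computation that keeps the original board immutable and grows a 'placed' set: repeat full-board passes, flipping every O-run that starts at a placed cell and ends at an X or placed cell, until a pass changes nothing; the answer is len(placed)-1 instead of an incremented counter.
import Mathlib
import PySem

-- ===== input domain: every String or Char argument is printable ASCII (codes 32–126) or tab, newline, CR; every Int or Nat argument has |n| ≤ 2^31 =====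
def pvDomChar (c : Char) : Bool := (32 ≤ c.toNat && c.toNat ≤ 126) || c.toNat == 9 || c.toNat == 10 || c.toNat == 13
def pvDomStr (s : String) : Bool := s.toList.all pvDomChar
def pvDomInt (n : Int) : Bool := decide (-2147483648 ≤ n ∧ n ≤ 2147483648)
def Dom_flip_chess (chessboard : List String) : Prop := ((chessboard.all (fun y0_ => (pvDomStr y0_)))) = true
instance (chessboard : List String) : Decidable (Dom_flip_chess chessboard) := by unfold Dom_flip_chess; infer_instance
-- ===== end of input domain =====

-- B replaces A's per-start BFS (mutated board copy + deque of flipped cells) by a fixpoint of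
-- whole-board passes over the immutable board with a growing 'placed' set; return value only.

-- ===== PORT A =====
def pvA_cell (board : List (List Char)) (r c : Int) : Char :=
  (PySem.List.pyGet? ((PySem.List.pyGet? board r).getD []) c).getD '?'

def pvA_set (board : List (List Char)) (r c : Int) (x : Char) : List (List Char) :=
  board.set r.toNat ((board.getD r.toNat []).set c.toNat x)

def pvA_dirs : List (Int × Int) := [(-1,-1),(-1,0),(-1,1),(0,-1),(0,1),(1,-1),(1,0),(1,1)]

-- ===== geometry =====

def pvA_walk (board : List (List Char)) (m n dr dc : Int) :
    Nat → Int → Int → List (Int × Int) → List (Int × Int) × Int × Int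
  | 0, nr, nc, path => (path, nr, nc)
  | fuel+1, nr, nc, path =>
    if 0 ≤ nr ∧ nr < m ∧ 0 ≤ nc ∧ nc < n ∧ pvA_cell board nr nc = 'O' then
      pvA_walk board m n dr dc fuel (nr+dr) (nc+dc) (path ++ [(nr, nc)])
    else (path, nr, nc)

def pvA_doDir (m n r c : Int) (st : List (List Char) × List (Int × Int) × Int)
    (d : Int × Int) : List (List Char) × List (Int × Int) × Int :=
  let w := pvA_walk st.1 m n d.1 d.2 (m.toNat + n.toNat + 2) (r + d.1) (c + d.2) []
  let path := w.1
  let nr := w.2.1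
  let nc := w.2.2
  if path ≠ [] ∧ 0 ≤ nr ∧ nr < m ∧ 0 ≤ nc ∧ nc < n ∧ pvA_cell st.1 nr nc = 'X' then
    path.foldl (fun s p => (pvA_set s.1 p.1 p.2 'X', s.2.1 ++ [p], s.2.2 + 1)) st
  else st

def pvA_bfs (m n : Int) : Nat → List (List Char) → List (Int × Int) → Int → Int
  | 0, _, _, cnt => cnt
  | fuel+1, board, queue, cnt =>
    match queue with
    | [] => cnt
    | (r, c) :: rest =>
      let st := pvA_dirs.foldl (pvA_doDir m n r c) (board, rest, cnt)
      pvA_bfs m n fuel st.1 st.2.1 st.2.2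

def flip_chess (chessboard : List String) : Int :=
  let rows := chessboard.map String.toList
  let m : Int := rows.length
  let n : Int := (rows.headD []).length
  (PySem.List.pyRange 0 m 1).foldl (fun acc i =>
    (PySem.List.pyRange 0 n 1).foldl (fun acc j =>
      if pvA_cell rows i j = '.' then
        max acc (pvA_bfs m n (m.toNat * n.toNat + 2) (pvA_set rows i j 'X') [(i, j)] 0)
      else acc) acc) 0

-- ===== PORT B =====
def pvB_cell (board : List (List Char)) (r c : Int) : Char :=
  (PySem.List.pyGet? ((PySem.List.pyGet? board r).getD []) c).getD '?'

def pvB_dirs : List (Int × Int) := [(-1,-1),(-1,0),(-1,1),(0,-1),(0,1),(1,-1),(1,0),(1,1)]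

def pvB_walk (rows : List (List Char)) (m n : Int) (placed : PySem.Set (Int × Int))
    (dr dc : Int) : Nat → Int → Int → List (Int × Int) → List (Int × Int) × Int × Int
  | 0, nr, nc, run => (run, nr, nc)
  | fuel+1, nr, nc, run =>
    if 0 ≤ nr ∧ nr < m ∧ 0 ≤ nc ∧ nc < n ∧ pvB_cell rows nr nc = 'O'
        ∧ ¬ PySem.Set.contains placed (nr, nc) then
      pvB_walk rows m n placed dr dc fuel (nr+dr) (nc+dc) (run ++ [(nr, nc)])
    else (run, nr, nc)

def pvB_doDir (rows : List (List Char)) (m n r c : Int)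
    (st : PySem.Set (Int × Int) × Bool) (d : Int × Int) : PySem.Set (Int × Int) × Bool :=
  let w := pvB_walk rows m n st.1 d.1 d.2 (m.toNat + n.toNat + 2) (r + d.1) (c + d.2) []
  let run := w.1
  let nr := w.2.1
  let nc := w.2.2
  if run ≠ [] ∧ 0 ≤ nr ∧ nr < m ∧ 0 ≤ nc ∧ nc < n
      ∧ (pvB_cell rows nr nc = 'X' ∨ PySem.Set.contains st.1 (nr, nc)) then
    (PySem.Set.update st.1 run, true)
  else st

def pvB_scanCell (rows : List (List Char)) (m n : Int)
    (st : PySem.Set (Int × Int) × Bool) (r c : Int) : PySem.Set (Int × Int) × Bool :=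
  if PySem.Set.contains st.1 (r, c) then pvB_dirs.foldl (pvB_doDir rows m n r c) st
  else st

def pvB_round (rows : List (List Char)) (m n : Int) (placed : PySem.Set (Int × Int)) :
    PySem.Set (Int × Int) × Bool :=
  (PySem.List.pyRange 0 m 1).foldl (fun st r =>
    (PySem.List.pyRange 0 n 1).foldl (fun st c => pvB_scanCell rows m n st r c) st)
    (placed, false)

def pvB_settle (rows : List (List Char)) (m n : Int) : Nat → PySem.Set (Int × Int) → Int
  | 0, placed => (placed.length : Int) - 1
  | fuel+1, placed =>
    let st := pvB_round rows m n placed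
    if st.2 then pvB_settle rows m n fuel st.1 else (st.1.length : Int) - 1

def flip_chess_alt (chessboard : List String) : Int :=
  let rows := chessboard.map String.toList
  let m : Int := rows.length
  let n : Int := (rows.headD []).length
  (PySem.List.pyRange 0 m 1).foldl (fun acc i =>
    (PySem.List.pyRange 0 n 1).foldl (fun acc j =>
      if pvB_cell rows i j = '.' then
        max acc (pvB_settle rows m n (m.toNat * n.toNat + 2)
          (PySem.Set.ofList [(i, j)]))
      else acc) acc) 0

-- ===== PRECONDITION & SPEC =====
-- Pre_ excludes exactly the inputs on which A raises IndexError: the empty list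
-- (len(chessboard[0])) and boards with a row shorter than the first row (the unconditional
-- scan 'chessboard[i][j]' for j in range(len(chessboard[0])) then indexes past its end).
def Pre_flip_chess (chessboard : List String) : Prop :=
  chessboard ≠ [] ∧ ∀ s ∈ chessboard, PySem.Str.len (chessboard.headD "") ≤ PySem.Str.len s
instance (chessboard : List String) : Decidable (Pre_flip_chess chessboard) := by
  unfold Pre_flip_chess; infer_instance
def pvWitness_flip_chess : List String := ["....X.", "....X.", "XOOO..", "......", "......"]
def Spec_flip_chess (chessboard : List String) (out : Int) : Prop := out = flip_chess_alt chessboard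
instance (chessboard : List String) (out : Int) : Decidable (Spec_flip_chess chessboard out) := by
  unfold Spec_flip_chess; infer_instance

-- ===== CLAIM (what is proved, stated in full; the proofs are below) =====
def Claim_equal_flip_chess : Prop := ∀ (chessboard : List String), Dom_flip_chess chessboard →
  Pre_flip_chess chessboard → Spec_flip_chess chessboard (flip_chess chessboard)

-- ===== LEMMAS AND PROOFS =====
-- Both ports are proved, per tried start cell, to return |S|-1 for the same finite set S:
-- the unique set of cells that contains the start, lies in bounds, is closed under the
-- flip rule (pvClosed), and is contained in every such closed set (soundness).
def pvRay (s d : Int × Int) (i : Nat) : Int × Int := (s.1 + (i:Int) * d.1, s.2 + (i:Int) * d.2)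

def pvInb (m n : Int) (p : Int × Int) : Prop := 0 ≤ p.1 ∧ p.1 < m ∧ 0 ≤ p.2 ∧ p.2 < n

def pvIsO (R : List (List Char)) (m n : Int) (S : Finset (Int × Int)) (p : Int × Int) : Prop :=
  pvInb m n p ∧ pvA_cell R p.1 p.2 = 'O' ∧ p ∉ S

def pvKspec (P : Int × Int → Prop) (s d : Int × Int) (k : Nat) : Prop :=
  (∀ i : Nat, 1 ≤ i → i ≤ k → P (pvRay s d i)) ∧ ¬ P (pvRay s d (k+1))

def pvFlip (R : List (List Char)) (m n : Int) (S : Finset (Int × Int)) (s d : Int × Int)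
    (k : Nat) : Prop :=
  pvKspec (pvIsO R m n S) s d k ∧ 1 ≤ k ∧ pvInb m n (pvRay s d (k+1)) ∧
    (pvA_cell R (pvRay s d (k+1)).1 (pvRay s d (k+1)).2 = 'X' ∨ pvRay s d (k+1) ∈ S)

def pvClosed (R : List (List Char)) (m n : Int) (C : Finset (Int × Int)) : Prop :=
  ∀ s ∈ C, ∀ d ∈ pvA_dirs, ∀ k, ¬ pvFlip R m n C s d k

def pvGood (R : List (List Char)) (m n : Int) (start : Int × Int)
    (C : Finset (Int × Int)) : Prop :=
  start ∈ C ∧ (∀ p ∈ C, pvInb m n p) ∧ pvClosed R m n C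

theorem pvRay_zero (s d : Int × Int) : pvRay s d 0 = s := by simp [pvRay]

theorem pvRay_shift (s d : Int × Int) (i : Nat) :
    pvRay (pvRay s d 1) d i = pvRay s d (i+1) := by
  simp [pvRay]; constructor <;> ring

theorem pvRay_rev (s d : Int × Int) (k i : Nat) (h : i ≤ k + 1) :
    pvRay (pvRay s d (k+1)) (-d.1, -d.2) i = pvRay s d (k+1-i) := by
  simp only [pvRay]; have : ((k+1-i : Nat) : Int) = (k:Int) + 1 - i := by omega
  rw [this]; refine Prod.ext ?_ ?_ <;> (push_cast; ring)

theorem pvDirs_spec : ∀ d ∈ pvA_dirs,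
    (d.1 = -1 ∨ d.1 = 0 ∨ d.1 = 1) ∧ (d.2 = -1 ∨ d.2 = 0 ∨ d.2 = 1) ∧ ¬(d.1 = 0 ∧ d.2 = 0) := by
  decide

theorem pvDirs_neg_mem {d : Int × Int} (h : d ∈ pvA_dirs) : (-d.1, -d.2) ∈ pvA_dirs := by
  fin_cases h <;> decide

theorem pvDirs_nodup : pvA_dirs.Nodup := by decide

theorem pvRay_inj {d : Int × Int} (hd : d ∈ pvA_dirs) {s : Int × Int} {i j : Nat}
    (h : pvRay s d i = pvRay s d j) : i = j := by
  obtain ⟨h1, h2, h3⟩ := pvDirs_spec d hd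
  simp only [pvRay, Prod.ext_iff] at h
  rcases h1 with e | e | e <;> rcases h2 with f | f | f <;>
    (rw [e, f] at h; simp at h ⊢; omega)

theorem pvRays_indep {d d' : Int × Int} (hd : d ∈ pvA_dirs) (hd' : d' ∈ pvA_dirs)
    (hne : d ≠ d') {s : Int × Int} {i j : Nat} (hi : 1 ≤ i) (hj : 1 ≤ j) :
    pvRay s d i ≠ pvRay s d' j := by
  intro h
  simp only [pvRay, Prod.ext_iff] at h
  obtain ⟨e1, e2⟩ := h
  have hi' : (1:Int) ≤ (i:Int) := by exact_mod_cast hi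
  have hj' : (1:Int) ≤ (j:Int) := by exact_mod_cast hj
  fin_cases hd <;> fin_cases hd' <;> simp_all <;> omega

-- ===== kspec =====

theorem pvKspec_unique {P : Int × Int → Prop} {s d : Int × Int} {k k' : Nat}
    (h : pvKspec P s d k) (h' : pvKspec P s d k') : k = k' := by
  by_contra hne
  rcases Nat.lt_or_ge k k' with hlt | hge
  · exact h.2 (h'.1 (k+1) (by omega) (by omega))
  · exact h'.2 (h.1 (k'+1) (by omega) (by omega))

theorem pvKspec_congr {P Q : Int × Int → Prop} (hpq : ∀ p, P p ↔ Q p) {s d : Int × Int}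
    {k : Nat} (h : pvKspec P s d k) : pvKspec Q s d k :=
  ⟨fun i h1 h2 => (hpq _).1 (h.1 i h1 h2), fun hq => h.2 ((hpq _).2 hq)⟩

theorem pvKspec_exists {P : Int × Int → Prop} {m n : Int} {s d : Int × Int}
    (hs : pvInb m n s) (hP : ∀ p, P p → pvInb m n p) (hd : d ∈ pvA_dirs) :
    ∃ k ≤ m.toNat + n.toNat, pvKspec P s d k := by
  haveI := Classical.decPred P
  have hB : ¬ P (pvRay s d (m.toNat + n.toNat + 1)) := by
    intro hp
    have hray := hP _ hp
    obtain ⟨e1, e2, e3⟩ := pvDirs_spec d hd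
    obtain ⟨a1, a2, a3, a4⟩ := hs
    obtain ⟨b1, b2, b3, b4⟩ := hray
    simp only [pvRay] at b1 b2 b3 b4
    have hm : (m.toNat : Int) = m := Int.toNat_of_nonneg (by omega)
    have hn : (n.toNat : Int) = n := Int.toNat_of_nonneg (by omega)
    have hc : ((m.toNat + n.toNat + 1 : Nat) : Int) = m + n + 1 := by push_cast [hm, hn]; ring
    rw [hc] at b1 b2 b3 b4
    rcases e1 with f | f | f <;> rcases e2 with g | g | g <;>
      simp only [f, g] at b1 b2 b3 b4 <;>
      first
        | exact e3 ⟨f, g⟩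
        | omega
  have hE : ∃ i, ¬ P (pvRay s d (i+1)) := ⟨m.toNat + n.toNat, hB⟩
  refine ⟨Nat.find hE, Nat.find_min' hE hB, ?_, Nat.find_spec hE⟩
  intro i h1 h2
  have := Nat.find_min hE (m := i - 1) (by omega)
  simp only [not_not] at this
  have hi : i - 1 + 1 = i := by omega
  rwa [hi] at this

-- ===== run absorption: a closed set swallows any O-run anchored in it =====

theorem pvRunAbsorb {R : List (List Char)} {m n : Int} {C : Finset (Int × Int)}
    (hCin : ∀ p ∈ C, pvInb m n p) (hC : pvClosed R m n C) :
    ∀ (k : Nat) (s d : Int × Int), s ∈ C → d ∈ pvA_dirs →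
      (∀ i, 1 ≤ i → i ≤ k → pvInb m n (pvRay s d i) ∧
        pvA_cell R (pvRay s d i).1 (pvRay s d i).2 = 'O') →
      pvInb m n (pvRay s d (k+1)) →
      (pvA_cell R (pvRay s d (k+1)).1 (pvRay s d (k+1)).2 = 'X' ∨ pvRay s d (k+1) ∈ C) →
      ∀ i, 1 ≤ i → i ≤ k → pvRay s d i ∈ C := by
  intro k
  induction k with
  | zero => intro s d _ _ _ _ _ i h1 h2; omega
  | succ k ih =>
    intro s d hs hd hrun hinbT hT
    have h1 : pvRay s d 1 ∈ C := by
      by_contra h1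
      obtain ⟨k1, _, hk1⟩ := pvKspec_exists (P := pvIsO R m n C) (hCin s hs)
        (fun p hp => hp.1) hd
      have hk1pos : 1 ≤ k1 := by
        rcases Nat.eq_zero_or_pos k1 with h0 | h0
        · exfalso; apply hk1.2; rw [h0]
          exact ⟨(hrun 1 le_rfl (by omega)).1, (hrun 1 le_rfl (by omega)).2, h1⟩
        · exact h0
      rcases Nat.lt_or_ge k1 (k+1) with hlt | hge
      · -- terminator of the C-run is a run cell that is in C
        have hcell := hrun (k1+1) (by omega) (by omega)
        have htin : pvRay s d (k1+1) ∈ C := by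
          by_contra hnotin
          exact hk1.2 ⟨hcell.1, hcell.2, hnotin⟩
        exact hC s hs d hd k1 ⟨hk1, hk1pos, hcell.1, Or.inr htin⟩
      · rcases Nat.eq_or_lt_of_le hge with heq | hgt
        · -- k1 = k+1 : the original terminator closes the C-run
          rw [← heq] at hk1
          exact hC s hs d hd (k+1) ⟨hk1, by omega, hinbT, hT⟩
        · -- k1 ≥ k+2 : the kspec claims the terminator cell is an O ∉ C, absurd
          have := hk1.1 (k+2) (by omega) (by omega)
          rcases hT with hX | hmem
          · rw [show k + 1 + 1 = k + 2 from rfl] at hX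
            rw [this.2.1] at hX; exact absurd hX (by decide)
          · exact this.2.2 (by rwa [show k + 2 = k + 1 + 1 from rfl])
    intro i hi1 hik
    rcases Nat.eq_or_lt_of_le hi1 with heq | hgt
    · rwa [← heq]
    · have hsh : ∀ j : Nat, pvRay (pvRay s d 1) d j = pvRay s d (j+1) := fun j => pvRay_shift s d j
      have hrun' : ∀ j, 1 ≤ j → j ≤ k → pvInb m n (pvRay (pvRay s d 1) d j) ∧
          pvA_cell R (pvRay (pvRay s d 1) d j).1 (pvRay (pvRay s d 1) d j).2 = 'O' := by
        intro j hj1 hj2; rw [hsh j]; exact hrun (j+1) (by omega) (by omega)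
      have hT' := hT
      have hinbT' := hinbT
      rw [show k + 1 + 1 = (k + 1) + 1 from rfl] at hT' hinbT'
      have := ih (pvRay s d 1) d h1 hd hrun'
        (by rw [hsh (k+1)]; exact hinbT') (by rw [hsh (k+1)]; exact hT')
        (i-1) (by omega) (by omega)
      rw [hsh (i-1), show i - 1 + 1 = i by omega] at this
      exact this

theorem pvUnique {R : List (List Char)} {m n : Int} {start : Int × Int}
    {S T : Finset (Int × Int)}
    (hS : pvGood R m n start S) (hSl : ∀ C, pvGood R m n start C → S ⊆ C)
    (hT : pvGood R m n start T) (hTl : ∀ C, pvGood R m n start C → T ⊆ C) : S = T :=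
  Finset.Subset.antisymm (hSl T hT) (hTl S hS)

-- ===== board representation =====

def pvCtx (R : List (List Char)) (m n : Int) : Prop :=
  (R.length : Int) = m ∧ 0 ≤ n ∧ ∀ i : Nat, i < R.length → n ≤ ((R.getD i []).length : Int)

def pvRep (R : List (List Char)) (m n : Int) (S : Finset (Int × Int))
    (board : List (List Char)) : Prop :=
  board.length = R.length ∧ (∀ i : Nat, (board.getD i []).length = (R.getD i []).length) ∧
  ∀ p : Int × Int, pvInb m n p →
    pvA_cell board p.1 p.2 = if p ∈ S then 'X' else pvA_cell R p.1 p.2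

theorem pvCell_eq (board : List (List Char)) (r c : Int) (hr : 0 ≤ r) (hc : 0 ≤ c) :
    pvA_cell board r c = (board.getD r.toNat []).getD c.toNat '?' := by
  simp [pvA_cell, PySem.List.pyGet?_of_nonneg _ hr, PySem.List.pyGet?_of_nonneg _ hc,
    List.getD_eq_getElem?_getD]

theorem pvSet_cell (board : List (List Char)) (q : Int × Int) (x : Char) (r c : Int)
    (hq1 : 0 ≤ q.1) (hq2 : 0 ≤ q.2) (hlt1 : q.1.toNat < board.length)
    (hlt2 : q.2.toNat < (board.getD q.1.toNat []).length) (hr : 0 ≤ r) (hc : 0 ≤ c) :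
    pvA_cell (pvA_set board q.1 q.2 x) r c =
      if r = q.1 ∧ c = q.2 then x else pvA_cell board r c := by
  rw [pvCell_eq _ _ _ hr hc, pvCell_eq _ _ _ hr hc]
  unfold pvA_set
  simp only [List.getD_eq_getElem?_getD]
  by_cases h1 : r = q.1
  · subst h1
    rw [List.getElem?_set_self hlt1, Option.getD_some]
    by_cases h2 : c = q.2
    · subst h2
      rw [List.getElem?_set_self (by simpa [List.getD_eq_getElem?_getD] using hlt2),
        Option.getD_some]
      simp
    · have hne : q.2.toNat ≠ c.toNat := by omega
      rw [List.getElem?_set_ne hne]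
      simp [h2]
  · have hne : q.1.toNat ≠ r.toNat := by omega
    rw [List.getElem?_set_ne hne]
    simp [h1]

theorem pvRep_init (R : List (List Char)) (m n : Int) : pvRep R m n ∅ R :=
  ⟨rfl, fun _ => rfl, fun p _ => by simp⟩

theorem pvRep_set {R : List (List Char)} {m n : Int} {S : Finset (Int × Int)}
    {board : List (List Char)} (ctx : pvCtx R m n) (hrep : pvRep R m n S board)
    {q : Int × Int} (hq : pvInb m n q) :
    pvRep R m n (insert q S) (pvA_set board q.1 q.2 'X') := by
  obtain ⟨hcm, hn0, hrow⟩ := ctx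
  obtain ⟨hlen, hrlen, hcell⟩ := hrep
  obtain ⟨hq1, hq2, hq3, hq4⟩ := hq
  have hlt1 : q.1.toNat < board.length := by omega
  have hlt2 : q.2.toNat < (board.getD q.1.toNat []).length := by
    have := hrow q.1.toNat (by omega)
    have := hrlen q.1.toNat
    omega
  refine ⟨by simpa [pvA_set] using hlen, ?_, ?_⟩
  · intro i
    unfold pvA_set
    by_cases h : i = q.1.toNat
    · subst h
      rw [List.getD_eq_getElem?_getD, List.getElem?_set_self hlt1, Option.getD_some,
        List.length_set]
      exact hrlen q.1.toNat
    · rw [List.getD_eq_getElem?_getD, List.getElem?_set_ne (Ne.symm h),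
        ← List.getD_eq_getElem?_getD]
      exact hrlen i
  · intro p hp
    obtain ⟨hp1, hp2, hp3, hp4⟩ := hp
    rw [pvSet_cell board q 'X' p.1 p.2 hq1 hq3 hlt1 hlt2 hp1 hp3]
    by_cases h : p = q
    · subst h; simp
    · have : ¬ (p.1 = q.1 ∧ p.2 = q.2) := by
        intro hc; exact h (Prod.ext hc.1 hc.2)
      rw [if_neg this, hcell p ⟨hp1, hp2, hp3, hp4⟩]
      simp [Finset.mem_insert, h]

theorem pvRep_cellO {R : List (List Char)} {m n : Int} {S : Finset (Int × Int)}
    {board : List (List Char)} (hrep : pvRep R m n S board) {p : Int × Int}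
    (hp : pvInb m n p) :
    pvA_cell board p.1 p.2 = 'O' ↔ (pvA_cell R p.1 p.2 = 'O' ∧ p ∉ S) := by
  rw [hrep.2.2 p hp]
  by_cases h : p ∈ S <;> simp [h]

theorem pvRep_cellX {R : List (List Char)} {m n : Int} {S : Finset (Int × Int)}
    {board : List (List Char)} (hrep : pvRep R m n S board) {p : Int × Int}
    (hp : pvInb m n p) :
    pvA_cell board p.1 p.2 = 'X' ↔ (pvA_cell R p.1 p.2 = 'X' ∨ p ∈ S) := by
  rw [hrep.2.2 p hp]
  by_cases h : p ∈ S <;> simp [h]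

-- ===== walk characterization (A) =====

def pvPath (s d : Int × Int) (k : Nat) : List (Int × Int) :=
  (List.range k).map (fun t => pvRay s d (t+1))

theorem pvPath_length (s d : Int × Int) (k : Nat) : (pvPath s d k).length = k := by
  simp [pvPath]

theorem pvPath_mem {s d : Int × Int} {k : Nat} {p : Int × Int} :
    p ∈ pvPath s d k ↔ ∃ i, 1 ≤ i ∧ i ≤ k ∧ p = pvRay s d i := by
  simp only [pvPath, List.mem_map, List.mem_range]
  constructor
  · rintro ⟨t, ht, rfl⟩; exact ⟨t+1, by omega, by omega, rfl⟩
  · rintro ⟨i, h1, h2, rfl⟩; exact ⟨i-1, by omega, by rw [show i - 1 + 1 = i by omega]⟩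

theorem pvPath_nodup {s d : Int × Int} (hd : d ∈ pvA_dirs) (k : Nat) :
    (pvPath s d k).Nodup := by
  refine List.Nodup.map ?_ (List.nodup_range)
  intro a b hab
  have := pvRay_inj hd hab
  omega

theorem pvA_walk_spec (board : List (List Char)) (m n : Int) (d s : Int × Int) (k : Nat)
    (hk : pvKspec (fun p => pvInb m n p ∧ pvA_cell board p.1 p.2 = 'O') s d k) :
    ∀ (fuel j : Nat) (acc : List (Int × Int)), j ≤ k → k - j < fuel →
    pvA_walk board m n d.1 d.2 fuel (pvRay s d (j+1)).1 (pvRay s d (j+1)).2 acc =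
      (acc ++ (List.range (k-j)).map (fun t => pvRay s d (j+1+t)),
       (pvRay s d (k+1)).1, (pvRay s d (k+1)).2) := by
  intro fuel
  induction fuel with
  | zero => intro j acc hj hf; omega
  | succ f ih =>
    intro j acc hj hf
    by_cases hjk : j = k
    · subst hjk
      show pvA_walk board m n d.1 d.2 (f+1) (pvRay s d (j+1)).1 (pvRay s d (j+1)).2 acc = _
      rw [pvA_walk, if_neg, Nat.sub_self]
      · simp
      · intro hg
        exact hk.2 ⟨⟨hg.1, hg.2.1, hg.2.2.1, hg.2.2.2.1⟩, hg.2.2.2.2⟩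
    · have hjlt : j < k := by omega
      have hP := hk.1 (j+1) (by omega) (by omega)
      show pvA_walk board m n d.1 d.2 (f+1) (pvRay s d (j+1)).1 (pvRay s d (j+1)).2 acc = _
      rw [pvA_walk, if_pos ⟨hP.1.1, hP.1.2.1, hP.1.2.2.1, hP.1.2.2.2, hP.2⟩]
      have hstep1 : (pvRay s d (j+1)).1 + d.1 = (pvRay s d (j+1+1)).1 := by
        simp [pvRay]; ring
      have hstep2 : (pvRay s d (j+1)).2 + d.2 = (pvRay s d (j+1+1)).2 := by
        simp [pvRay]; ring
      rw [hstep1, hstep2]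
      have hacc : ((pvRay s d (j+1)).1, (pvRay s d (j+1)).2) = pvRay s d (j+1) := rfl
      rw [hacc, ih (j+1) (acc ++ [pvRay s d (j+1)]) (by omega) (by omega)]
      simp only [Prod.mk.injEq, and_true]
      rw [List.append_assoc, List.singleton_append]
      have hkj : k - j = (k - (j+1)) + 1 := by omega
      rw [hkj, List.range_succ_eq_map, List.map_cons, List.map_map]
      refine congrArg _ ?_
      rw [List.cons_eq_cons]
      constructor
      · norm_num
      · apply List.map_congr_left
        intro t ht
        show pvRay s d (j+1+1+t) = pvRay s d (j+1+(Nat.succ t))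
        congr 1
        omega

theorem pvA_walk_run {R board : List (List Char)} {m n : Int} {S : Finset (Int × Int)}
    (hrep : pvRep R m n S board) {r : Int × Int} (_hr : pvInb m n r) {d : Int × Int}
    (_hd : d ∈ pvA_dirs) {k : Nat} (hk : pvKspec (pvIsO R m n S) r d k)
    (hkb : k ≤ m.toNat + n.toNat) :
    pvA_walk board m n d.1 d.2 (m.toNat + n.toNat + 2) (r.1 + d.1) (r.2 + d.2) [] =
      (pvPath r d k, (pvRay r d (k+1)).1, (pvRay r d (k+1)).2) := by
  have hiff : ∀ p, (pvInb m n p ∧ pvA_cell board p.1 p.2 = 'O') ↔ pvIsO R m n S p := by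
    intro p
    constructor
    · rintro ⟨hp, hc⟩
      obtain ⟨hcO, hns⟩ := (pvRep_cellO hrep hp).1 hc
      exact ⟨hp, hcO, hns⟩
    · rintro ⟨hp, hc, hns⟩
      exact ⟨hp, (pvRep_cellO hrep hp).2 ⟨hc, hns⟩⟩
  have hk' : pvKspec (fun p => pvInb m n p ∧ pvA_cell board p.1 p.2 = 'O') r d k :=
    pvKspec_congr (fun p => (hiff p).symm) hk
  have h1 : (pvRay r d 1).1 = r.1 + d.1 := by simp [pvRay]
  have h2 : (pvRay r d 1).2 = r.2 + d.2 := by simp [pvRay]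
  have := pvA_walk_spec board m n d r k hk' (m.toNat + n.toNat + 2) 0 [] (by omega) (by omega)
  rw [show (0:Nat) + 1 = 1 from rfl, h1, h2] at this
  rw [this]
  simp only [Nat.sub_zero, List.nil_append, Prod.mk.injEq, and_true]
  unfold pvPath
  apply List.map_congr_left
  intro t ht
  congr 1
  omega

theorem pvCardLemma {S S' : Finset (Int × Int)} {newl : List (Int × Int)} (hsub : S ⊆ S')
    (hnd : newl.Nodup) (hmem : ∀ p, p ∈ newl ↔ p ∈ S' ∧ p ∉ S) :
    S'.card = S.card + newl.length := by
  have ht : newl.toFinset = S' \ S := by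
    ext p; simp [List.mem_toFinset, hmem p, Finset.mem_sdiff]
  have hc : newl.toFinset.card = newl.length := List.toFinset_card_of_nodup hnd
  rw [ht] at hc
  have := Finset.card_sdiff_add_card_eq_card hsub
  omega

theorem pvA_flipFold {R : List (List Char)} {m n : Int} (ctx : pvCtx R m n) :
    ∀ (cells : List (Int × Int)) {S : Finset (Int × Int)} {board : List (List Char)}
      {queue : List (Int × Int)} {cnt : Int},
      pvRep R m n S board → cells.Nodup →
      (∀ p ∈ cells, pvInb m n p ∧ p ∉ S) →
      ∃ board',
        cells.foldl (fun s p => (pvA_set s.1 p.1 p.2 'X', s.2.1 ++ [p], s.2.2 + 1))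
          (board, queue, cnt) = (board', queue ++ cells, cnt + cells.length) ∧
        pvRep R m n (S ∪ cells.toFinset) board' := by
  intro cells
  induction cells with
  | nil =>
    intro S board queue cnt hrep _ _
    exact ⟨board, by simp, by simpa using hrep⟩
  | cons c t ih =>
    intro S board queue cnt hrep hnd hmem
    have hc := hmem c (by simp)
    have hrep' := pvRep_set ctx hrep hc.1
    have hmem' : ∀ p ∈ t, pvInb m n p ∧ p ∉ insert c S := by
      intro p hp
      refine ⟨(hmem p (by simp [hp])).1, ?_⟩
      simp only [Finset.mem_insert, not_or]
      exact ⟨fun he => (List.nodup_cons.1 hnd).1 (he ▸ hp), (hmem p (by simp [hp])).2⟩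
    obtain ⟨board', hfold, hrep''⟩ := ih hrep' (List.nodup_cons.1 hnd).2 hmem'
    refine ⟨board', ?_, ?_⟩
    · rw [List.foldl_cons, hfold]
      simp only [Prod.mk.injEq]
      refine ⟨trivial, by simp, ?_⟩
      push_cast [List.length_cons]
      ring
    · have : insert c S ∪ t.toFinset = S ∪ (c :: t).toFinset := by
        ext p; simp [Finset.mem_insert, Finset.mem_union]
        try tauto
      rwa [this] at hrep''

def pvAState (R : List (List Char)) (m n : Int) (start : Int × Int) (S : Finset (Int × Int))
    (st : List (List Char) × List (Int × Int) × Int) : Prop :=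
  pvRep R m n S st.1 ∧ st.2.2 = (S.card : Int) - 1 ∧ (∀ p ∈ st.2.1, p ∈ S) ∧
  (∀ p ∈ S, pvInb m n p) ∧ start ∈ S ∧ ∀ C, pvGood R m n start C → S ⊆ C

theorem pvFlipTransfer {R : List (List Char)} {m n : Int} {S S' : Finset (Int × Int)}
    {r d : Int × Int} (hsub : S ⊆ S')
    (hnew : ∀ p, p ∈ S' → p ∉ S → ∀ i : Nat, 1 ≤ i → p ≠ pvRay r d i)
    (hnf : ∀ k, ¬ pvFlip R m n S r d k) : ∀ k, ¬ pvFlip R m n S' r d k := by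
  intro k hfl
  obtain ⟨hks, hk1, hinb, hterm⟩ := hfl
  apply hnf k
  refine ⟨⟨?_, ?_⟩, hk1, hinb, ?_⟩
  · intro i h1 h2
    obtain ⟨a, b, c⟩ := hks.1 i h1 h2
    exact ⟨a, b, fun hmem => c (hsub hmem)⟩
  · intro hisO
    apply hks.2
    obtain ⟨a, b, c⟩ := hisO
    refine ⟨a, b, fun hmem' => ?_⟩
    exact hnew _ hmem' c (k+1) (by omega) rfl
  · rcases hterm with hX | hmem
    · exact Or.inl hX
    · by_cases hS : pvRay r d (k+1) ∈ S
      · exact Or.inr hS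
      · exact absurd rfl (hnew _ hmem hS (k+1) (by omega))

theorem pvA_doDir_spec {R : List (List Char)} {m n : Int} {start : Int × Int}
    {S : Finset (Int × Int)} (ctx : pvCtx R m n)
    {board : List (List Char)} {queue : List (Int × Int)} {cnt : Int} {r d : Int × Int}
    (hr : r ∈ S) (hd : d ∈ pvA_dirs) (hst : pvAState R m n start S (board, queue, cnt)) :
    ∃ S' newl, pvAState R m n start S' (pvA_doDir m n r.1 r.2 (board, queue, cnt) d) ∧
      S ⊆ S' ∧
      (pvA_doDir m n r.1 r.2 (board, queue, cnt) d).2.1 = queue ++ newl ∧ newl.Nodup ∧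
      (∀ p, p ∈ newl ↔ p ∈ S' ∧ p ∉ S) ∧
      (∀ p ∈ newl, ∃ i : Nat, 1 ≤ i ∧ p = pvRay r d i) ∧
      (∀ k, ¬ pvFlip R m n S' r d k) := by
  obtain ⟨hrep, hcnt, hq, hinb, hstart, hsound⟩ := hst
  have hrinb : pvInb m n r := hinb r hr
  obtain ⟨k, hkb, hks⟩ := pvKspec_exists (P := pvIsO R m n S) hrinb (fun p hp => hp.1) hd
  have hwalk := pvA_walk_run hrep hrinb hd hks hkb
  unfold pvA_doDir
  simp only [hwalk]
  by_cases hg : pvPath r d k ≠ [] ∧ 0 ≤ (pvRay r d (k+1)).1 ∧ (pvRay r d (k+1)).1 < m ∧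
      0 ≤ (pvRay r d (k+1)).2 ∧ (pvRay r d (k+1)).2 < n ∧
      pvA_cell board (pvRay r d (k+1)).1 (pvRay r d (k+1)).2 = 'X'
  · rw [if_pos hg]
    obtain ⟨hpne, ht1, ht2, ht3, ht4, htX⟩ := hg
    have hk1 : 1 ≤ k := by
      rcases Nat.eq_zero_or_pos k with h0 | h0
      · exfalso; apply hpne; rw [h0]; rfl
      · exact h0
    have htinb : pvInb m n (pvRay r d (k+1)) := ⟨ht1, ht2, ht3, ht4⟩
    have hterm : pvA_cell R (pvRay r d (k+1)).1 (pvRay r d (k+1)).2 = 'X' ∨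
        pvRay r d (k+1) ∈ S := (pvRep_cellX hrep htinb).1 htX
    have hcells : ∀ p ∈ pvPath r d k, pvInb m n p ∧ p ∉ S := by
      intro p hp
      obtain ⟨i, hi1, hi2, rfl⟩ := pvPath_mem.1 hp
      obtain ⟨a, b, c⟩ := hks.1 i hi1 hi2
      exact ⟨a, c⟩
    obtain ⟨board', hfold, hrep'⟩ := pvA_flipFold ctx (pvPath r d k) hrep
      (pvPath_nodup hd k) hcells
    rw [hfold]
    refine ⟨S ∪ (pvPath r d k).toFinset, pvPath r d k, ?_, Finset.subset_union_left, rfl,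
      pvPath_nodup hd k, ?_, ?_, ?_⟩
    · have hmeml : ∀ p, p ∈ pvPath r d k ↔ p ∈ S ∪ (pvPath r d k).toFinset ∧ p ∉ S := by
        intro p
        constructor
        · intro hp
          exact ⟨Finset.mem_union_right _ (List.mem_toFinset.2 hp), (hcells p hp).2⟩
        · rintro ⟨hp, hns⟩
          rcases Finset.mem_union.1 hp with h | h
          · exact absurd h hns
          · exact List.mem_toFinset.1 h
      have hcard : (S ∪ (pvPath r d k).toFinset).card = S.card + k := by
        have := pvCardLemma (S' := S ∪ (pvPath r d k).toFinset)
          Finset.subset_union_left (pvPath_nodup hd k) hmeml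
        rwa [pvPath_length] at this
      refine ⟨hrep', ?_, ?_, ?_, Finset.mem_union_left _ hstart, ?_⟩
      · show cnt + ((pvPath r d k).length : Int) = _
        rw [pvPath_length, hcard]
        simp only at hcnt
        push_cast at hcnt ⊢
        omega
      · intro p hp
        rcases List.mem_append.1 hp with h | h
        · exact Finset.mem_union_left _ (hq p h)
        · exact Finset.mem_union_right _ (List.mem_toFinset.2 h)
      · intro p hp
        rcases Finset.mem_union.1 hp with h | h
        · exact hinb p h
        · exact (hcells p (List.mem_toFinset.1 h)).1
      · intro C hC
        have hSC := hsound C hC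
        have habs := pvRunAbsorb hC.2.1 hC.2.2 k r d (hSC hr) hd
          (fun i h1 h2 => ⟨(hks.1 i h1 h2).1, (hks.1 i h1 h2).2.1⟩) htinb
          (by rcases hterm with hX | hm; exact Or.inl hX; exact Or.inr (hSC hm))
        intro p hp
        rcases Finset.mem_union.1 hp with h | h
        · exact hSC h
        · obtain ⟨i, hi1, hi2, rfl⟩ := pvPath_mem.1 (List.mem_toFinset.1 h)
          exact habs i hi1 hi2
    · intro p
      constructor
      · intro hp
        exact ⟨Finset.mem_union_right _ (List.mem_toFinset.2 hp), (hcells p hp).2⟩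
      · rintro ⟨hp, hns⟩
        rcases Finset.mem_union.1 hp with h | h
        · exact absurd h hns
        · exact List.mem_toFinset.1 h
    · intro p hp
      obtain ⟨i, hi1, hi2, rfl⟩ := pvPath_mem.1 hp
      exact ⟨i, hi1, rfl⟩
    · intro k' hfl
      have h1mem : pvRay r d 1 ∈ S ∪ (pvPath r d k).toFinset :=
        Finset.mem_union_right _ (List.mem_toFinset.2 (pvPath_mem.2 ⟨1, le_rfl, hk1, rfl⟩))
      obtain ⟨hks', hk1', _, _⟩ := hfl
      exact (hks'.1 1 le_rfl hk1').2.2 h1mem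
  · rw [if_neg hg]
    refine ⟨S, [], ⟨hrep, hcnt, hq, hinb, hstart, hsound⟩, Finset.Subset.refl S,
      by simp, List.nodup_nil, by simp, by simp, ?_⟩
    intro k' hfl
    obtain ⟨hks', hk1', hinb', hterm'⟩ := hfl
    have hkk : k' = k := pvKspec_unique hks' hks
    subst hkk
    apply hg
    refine ⟨?_, hinb'.1, hinb'.2.1, hinb'.2.2.1, hinb'.2.2.2, ?_⟩
    · intro hnil
      have := pvPath_length r d k'
      rw [hnil] at this
      simp at this
      omega
    · exact (pvRep_cellX hrep hinb').2 hterm'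

theorem pvCard_le {m n : Int} {S : Finset (Int × Int)} (hinb : ∀ p ∈ S, pvInb m n p) :
    S.card ≤ m.toNat * n.toNat := by
  have hsub : S ⊆ (Finset.Icc (0:Int) (m-1)) ×ˢ (Finset.Icc (0:Int) (n-1)) := by
    intro p hp
    obtain ⟨a, b, c, e⟩ := hinb p hp
    simp only [Finset.mem_product, Finset.mem_Icc]
    omega
  have hcard := Finset.card_le_card hsub
  rw [Finset.card_product, Int.card_Icc, Int.card_Icc] at hcard
  have e1 : m - 1 + 1 - 0 = m := by ring
  have e2 : n - 1 + 1 - 0 = n := by ring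
  rwa [e1, e2] at hcard

theorem pvA_dirFold_aux {R : List (List Char)} {m n : Int} {start r : Int × Int}
    {S0 : Finset (Int × Int)} (ctx : pvCtx R m n) (hr0 : r ∈ S0) :
    ∀ (l done : List (Int × Int)), pvA_dirs = done ++ l →
    ∀ (S : Finset (Int × Int)) (board : List (List Char)) (q0 newl : List (Int × Int))
      (cnt : Int),
      pvAState R m n start S (board, q0 ++ newl, cnt) → S0 ⊆ S →
      newl.Nodup → (∀ p, p ∈ newl ↔ p ∈ S ∧ p ∉ S0) →
      (∀ d ∈ done, ∀ k, ¬ pvFlip R m n S r d k) →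
      ∃ S' newl',
        pvAState R m n start S' (l.foldl (pvA_doDir m n r.1 r.2) (board, q0 ++ newl, cnt)) ∧
        S ⊆ S' ∧
        (l.foldl (pvA_doDir m n r.1 r.2) (board, q0 ++ newl, cnt)).2.1 = q0 ++ newl' ∧
        newl'.Nodup ∧ (∀ p, p ∈ newl' ↔ p ∈ S' ∧ p ∉ S0) ∧
        (∀ d ∈ done ++ l, ∀ k, ¬ pvFlip R m n S' r d k) := by
  intro l
  induction l with
  | nil =>
    intro done heq S board q0 newl cnt hst hsub hnd hmem hnf
    refine ⟨S, newl, hst, Finset.Subset.refl S, rfl, hnd, hmem, ?_⟩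
    intro d hdm
    rw [List.append_nil] at hdm
    exact hnf d hdm
  | cons d0 l' ih =>
    intro done heq S board q0 newl cnt hst hsub hnd hmem hnf
    have hd0 : d0 ∈ pvA_dirs := by rw [heq]; simp
    have hrS : r ∈ S := hsub hr0
    obtain ⟨S1, nl1, hst1, hsub1, hq1, hnd1, hmem1, hray1, hnf1⟩ :=
      pvA_doDir_spec ctx hrS hd0 hst
    have hd0done : d0 ∉ done := by
      have hnodup := pvDirs_nodup
      rw [heq] at hnodup
      have hdisj := List.disjoint_of_nodup_append hnodup
      intro hmem0
      exact hdisj hmem0 (by simp)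
    have hnfdone1 : ∀ d ∈ done, ∀ k, ¬ pvFlip R m n S1 r d k := by
      intro d hdm
      have hdm' : d ∈ pvA_dirs := by rw [heq]; exact List.mem_append_left _ hdm
      have hdne : d0 ≠ d := fun he => hd0done (he ▸ hdm)
      apply pvFlipTransfer hsub1 ?_ (hnf d hdm)
      intro p hpS1 hpS i hi hpe
      obtain ⟨j, hj1, hje⟩ := hray1 p ((hmem1 p).2 ⟨hpS1, hpS⟩)
      exact absurd (hje.symm.trans hpe) (pvRays_indep hd0 hdm' hdne hj1 hi)
    have hq1' : (pvA_doDir m n r.1 r.2 (board, q0 ++ newl, cnt) d0).2.1 =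
        q0 ++ (newl ++ nl1) := by rw [hq1, List.append_assoc]
    have hsteq : (pvA_doDir m n r.1 r.2 (board, q0 ++ newl, cnt) d0) =
        ((pvA_doDir m n r.1 r.2 (board, q0 ++ newl, cnt) d0).1, q0 ++ (newl ++ nl1),
         (pvA_doDir m n r.1 r.2 (board, q0 ++ newl, cnt) d0).2.2) := by
      rw [← hq1']
    have hst1' : pvAState R m n start S1
        ((pvA_doDir m n r.1 r.2 (board, q0 ++ newl, cnt) d0).1, q0 ++ (newl ++ nl1),
         (pvA_doDir m n r.1 r.2 (board, q0 ++ newl, cnt) d0).2.2) := by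
      rw [← hsteq]; exact hst1
    have hndisj : newl.Disjoint nl1 := by
      intro p hp hp1
      exact ((hmem1 p).1 hp1).2 ((hmem p).1 hp).1
    have hnd' : (newl ++ nl1).Nodup := List.Nodup.append hnd hnd1 hndisj
    have hmem' : ∀ p, p ∈ newl ++ nl1 ↔ p ∈ S1 ∧ p ∉ S0 := by
      intro p
      rw [List.mem_append]
      constructor
      · rintro (hp | hp)
        · exact ⟨hsub1 ((hmem p).1 hp).1, ((hmem p).1 hp).2⟩
        · exact ⟨((hmem1 p).1 hp).1, fun h0 => ((hmem1 p).1 hp).2 (hsub h0)⟩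
      · rintro ⟨hp1, hp0⟩
        by_cases hpS : p ∈ S
        · exact Or.inl ((hmem p).2 ⟨hpS, hp0⟩)
        · exact Or.inr ((hmem1 p).2 ⟨hp1, hpS⟩)
    have hnfnew : ∀ d ∈ done ++ [d0], ∀ k, ¬ pvFlip R m n S1 r d k := by
      intro d hdm
      rcases List.mem_append.1 hdm with h | h
      · exact hnfdone1 d h
      · rw [List.mem_singleton] at h
        subst h
        exact hnf1
    obtain ⟨S', newl', hstF, hsubF, hqF, hndF, hmemF, hnfF⟩ :=
      ih (done ++ [d0]) (by rw [heq]; simp) S1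
        (pvA_doDir m n r.1 r.2 (board, q0 ++ newl, cnt) d0).1 q0 (newl ++ nl1)
        (pvA_doDir m n r.1 r.2 (board, q0 ++ newl, cnt) d0).2.2 hst1'
        (hsub.trans hsub1) hnd' hmem' hnfnew
    rw [← hsteq] at hstF hqF
    refine ⟨S', newl', ?_, hsub1.trans hsubF, ?_, hndF, hmemF, ?_⟩
    · rw [List.foldl_cons]; exact hstF
    · rw [List.foldl_cons]; exact hqF
    · intro d hdm
      apply hnfF d
      simpa using hdm

def pvHang (R : List (List Char)) (m n : Int) (S : Finset (Int × Int))
    (queue : List (Int × Int)) : Prop :=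
  ∀ s ∈ S, s ∉ queue → ∀ d ∈ pvA_dirs, ∀ k, pvFlip R m n S s d k → pvRay s d (k+1) ∈ queue

theorem pvA_bfs_spec {R : List (List Char)} {m n : Int} {start : Int × Int}
    (ctx : pvCtx R m n) :
    ∀ (fuel : Nat) (S : Finset (Int × Int)) (board : List (List Char))
      (queue : List (Int × Int)) (cnt : Int),
      pvAState R m n start S (board, queue, cnt) → pvHang R m n S queue →
      queue.length + (m.toNat * n.toNat + 1 - S.card) < fuel →
      ∃ Sf, pvGood R m n start Sf ∧ (∀ C, pvGood R m n start C → Sf ⊆ C) ∧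
        pvA_bfs m n fuel board queue cnt = (Sf.card : Int) - 1 := by
  intro fuel
  induction fuel with
  | zero => intro S board queue cnt _ _ hm; omega
  | succ f ih =>
    intro S board queue cnt hst hhang hm
    obtain ⟨hrep, hcnt, hq, hinb, hstart, hsound⟩ := hst
    match queue with
    | [] =>
      refine ⟨S, ⟨hstart, hinb, ?_⟩, hsound, ?_⟩
      · intro s hs d hd k hfl
        exact absurd (hhang s hs (List.not_mem_nil) d hd k hfl) (List.not_mem_nil)
      · show cnt = (S.card : Int) - 1
        exact hcnt
    | (qr, qc) :: rest =>
      have hrS : (qr, qc) ∈ S := hq _ (by simp)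
      have hstRest : pvAState R m n start S (board, rest, cnt) :=
        ⟨hrep, hcnt, fun p hp => hq p (by simp [hp]), hinb, hstart, hsound⟩
      have hstRest' : pvAState R m n start S (board, rest ++ [], cnt) := by
        rwa [List.append_nil]
      obtain ⟨S', newl, hstF, hsubF, hqF, hndF, hmemF, hnfF⟩ :=
        pvA_dirFold_aux (r := (qr, qc)) ctx hrS pvA_dirs [] rfl S board rest [] cnt
          hstRest' (Finset.Subset.refl S) List.nodup_nil (by simp) (by simp)
      rw [List.append_nil] at hstF hqF
      have hnoflip : ∀ d ∈ pvA_dirs, ∀ k, ¬ pvFlip R m n S' (qr, qc) d k := by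
        intro d hd
        exact hnfF d (by simpa using hd)
      -- re-establish the hanging invariant
      have hhang' : pvHang R m n S' (rest ++ newl) := by
        intro s hs hnotin d hd k hfl
        have hsnew : s ∉ newl := fun h => hnotin (List.mem_append_right _ h)
        have hsrest : s ∉ rest := fun h => hnotin (List.mem_append_left _ h)
        have hsS : s ∈ S := by
          by_cases hsS : s ∈ S
          · exact hsS
          · exact absurd ((hmemF s).2 ⟨hs, hsS⟩) hsnew
        by_cases hsr : s = (qr, qc)
        · subst hsr
          exact absurd hfl (hnoflip d hd k)
        · have hcellsS : ∀ i, 1 ≤ i → i ≤ k → pvIsO R m n S (pvRay s d i) := by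
            intro i h1 h2
            obtain ⟨a, b, c⟩ := hfl.1.1 i h1 h2
            exact ⟨a, b, fun hmm => c (hsubF hmm)⟩
          by_cases htn : pvRay s d (k+1) ∈ S' ∧ pvRay s d (k+1) ∉ S
          · exact List.mem_append_right _ ((hmemF _).2 htn)
          · have htOld : pvA_cell R (pvRay s d (k+1)).1 (pvRay s d (k+1)).2 = 'X' ∨
                pvRay s d (k+1) ∈ S := by
              rcases hfl.2.2.2 with hX | hmm
              · exact Or.inl hX
              · by_cases hS : pvRay s d (k+1) ∈ S
                · exact Or.inr hS
                · exact absurd ⟨hmm, hS⟩ htn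
            have hksS : pvKspec (pvIsO R m n S) s d k := by
              refine ⟨hcellsS, ?_⟩
              rintro ⟨a, b, c⟩
              rcases htOld with hX | hmm
              · rw [hX] at b; exact absurd b (by decide)
              · exact c hmm
            have hflS : pvFlip R m n S s d k := ⟨hksS, hfl.2.1, hfl.2.2.1, htOld⟩
            have hmemQ := hhang s hsS (by simp [hsr, hsrest]) d hd k hflS
            rcases List.mem_cons.1 hmemQ with hqq | hrr
            · -- terminator is the popped cell: the reversed run contradicts noflip
              exfalso
              have hnegd : (-d.1, -d.2) ∈ pvA_dirs := pvDirs_neg_mem hd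
              apply hnoflip (-d.1, -d.2) hnegd k
              have hrevmem : ∀ i, 1 ≤ i → i ≤ k →
                  pvIsO R m n S' (pvRay (qr, qc) (-d.1, -d.2) i) := by
                intro i h1 h2
                have := pvRay_rev s d k i (by omega)
                rw [← hqq, this]
                exact hfl.1.1 (k+1-i) (by omega) (by omega)
              refine ⟨⟨hrevmem, ?_⟩, hfl.2.1, ?_, ?_⟩
              · have hrev := pvRay_rev s d k (k+1) (by omega)
                rw [← hqq, hrev, Nat.sub_self, pvRay_zero]
                rintro ⟨_, _, c⟩
                exact c hs
              · have hrev := pvRay_rev s d k (k+1) (by omega)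
                rw [← hqq, hrev, Nat.sub_self, pvRay_zero]
                obtain ⟨a1, a2, a3, a4⟩ := hinb s hsS
                exact ⟨a1, a2, a3, a4⟩
              · have hrev := pvRay_rev s d k (k+1) (by omega)
                rw [← hqq, hrev, Nat.sub_self, pvRay_zero]
                exact Or.inr hs
            · exact List.mem_append_left _ hrr
      have hcard' : S'.card = S.card + newl.length := pvCardLemma hsubF hndF hmemF
      have hcardle : S'.card ≤ m.toNat * n.toNat := pvCard_le hstF.2.2.2.1
      have hm' : (rest ++ newl).length + (m.toNat * n.toNat + 1 - S'.card) < f := by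
        rw [List.length_append]
        simp only [List.length_cons] at hm
        omega
      have hstF' : pvAState R m n start S'
          ((pvA_dirs.foldl (pvA_doDir m n qr qc) (board, rest, cnt)).1,
           (pvA_dirs.foldl (pvA_doDir m n qr qc) (board, rest, cnt)).2.1,
           (pvA_dirs.foldl (pvA_doDir m n qr qc) (board, rest, cnt)).2.2) := hstF
      obtain ⟨Sf, hgood, hleast, heval⟩ := ih S'
        (pvA_dirs.foldl (pvA_doDir m n qr qc) (board, rest, cnt)).1
        (pvA_dirs.foldl (pvA_doDir m n qr qc) (board, rest, cnt)).2.1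
        (pvA_dirs.foldl (pvA_doDir m n qr qc) (board, rest, cnt)).2.2
        hstF' (by rw [hqF]; exact hhang') (by rw [hqF]; exact hm')
      exact ⟨Sf, hgood, hleast, heval⟩

-- ===== B side =====

theorem pvB_dirs_eq : pvB_dirs = pvA_dirs := rfl

theorem pvB_cell_eq : pvB_cell = pvA_cell := rfl

def pvBState (R : List (List Char)) (m n : Int) (start : Int × Int)
    (S : Finset (Int × Int)) (placed : PySem.Set (Int × Int)) : Prop :=
  placed.Nodup ∧ (∀ p : Int × Int, p ∈ placed ↔ p ∈ S) ∧ (∀ p ∈ S, pvInb m n p) ∧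
  start ∈ S ∧ ∀ C, pvGood R m n start C → S ⊆ C

theorem pvLenCard {l : List (Int × Int)} {S : Finset (Int × Int)} (hnd : l.Nodup)
    (hiff : ∀ p, p ∈ l ↔ p ∈ S) : l.length = S.card := by
  have ht : l.toFinset = S := by ext p; simp [List.mem_toFinset, hiff p]
  have := List.toFinset_card_of_nodup hnd
  rw [ht] at this
  omega

theorem pvB_walk_spec (rows : List (List Char)) (m n : Int)
    (placed : PySem.Set (Int × Int)) (d s : Int × Int) (k : Nat)
    (hk : pvKspec (fun p => pvInb m n p ∧ pvB_cell rows p.1 p.2 = 'O' ∧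
      ¬ PySem.Set.contains placed p) s d k) :
    ∀ (fuel j : Nat) (acc : List (Int × Int)), j ≤ k → k - j < fuel →
    pvB_walk rows m n placed d.1 d.2 fuel (pvRay s d (j+1)).1 (pvRay s d (j+1)).2 acc =
      (acc ++ (List.range (k-j)).map (fun t => pvRay s d (j+1+t)),
       (pvRay s d (k+1)).1, (pvRay s d (k+1)).2) := by
  intro fuel
  induction fuel with
  | zero => intro j acc hj hf; omega
  | succ f ih =>
    intro j acc hj hf
    by_cases hjk : j = k
    · subst hjk
      show pvB_walk rows m n placed d.1 d.2 (f+1) (pvRay s d (j+1)).1 (pvRay s d (j+1)).2 acc = _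
      rw [pvB_walk, if_neg, Nat.sub_self]
      · simp
      · intro hg
        exact hk.2 ⟨⟨hg.1, hg.2.1, hg.2.2.1, hg.2.2.2.1⟩, hg.2.2.2.2.1, hg.2.2.2.2.2⟩
    · have hjlt : j < k := by omega
      have hP := hk.1 (j+1) (by omega) (by omega)
      show pvB_walk rows m n placed d.1 d.2 (f+1) (pvRay s d (j+1)).1 (pvRay s d (j+1)).2 acc = _
      rw [pvB_walk, if_pos ⟨hP.1.1, hP.1.2.1, hP.1.2.2.1, hP.1.2.2.2, hP.2.1, hP.2.2⟩]
      have hstep1 : (pvRay s d (j+1)).1 + d.1 = (pvRay s d (j+1+1)).1 := by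
        simp [pvRay]; ring
      have hstep2 : (pvRay s d (j+1)).2 + d.2 = (pvRay s d (j+1+1)).2 := by
        simp [pvRay]; ring
      rw [hstep1, hstep2]
      have hacc : ((pvRay s d (j+1)).1, (pvRay s d (j+1)).2) = pvRay s d (j+1) := rfl
      rw [hacc, ih (j+1) (acc ++ [pvRay s d (j+1)]) (by omega) (by omega)]
      simp only [Prod.mk.injEq, and_true]
      rw [List.append_assoc, List.singleton_append]
      have hkj : k - j = (k - (j+1)) + 1 := by omega
      rw [hkj, List.range_succ_eq_map, List.map_cons, List.map_map]
      refine congrArg _ ?_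
      rw [List.cons_eq_cons]
      constructor
      · norm_num
      · apply List.map_congr_left
        intro t ht
        show pvRay s d (j+1+1+t) = pvRay s d (j+1+(Nat.succ t))
        congr 1
        omega

theorem pvB_walk_run {R : List (List Char)} {m n : Int} {S : Finset (Int × Int)}
    {placed : PySem.Set (Int × Int)} (hmm : ∀ p : Int × Int, p ∈ placed ↔ p ∈ S)
    {r : Int × Int} (_hr : pvInb m n r) {d : Int × Int} (_hd : d ∈ pvA_dirs) {k : Nat}
    (hk : pvKspec (pvIsO R m n S) r d k) (hkb : k ≤ m.toNat + n.toNat) :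
    pvB_walk R m n placed d.1 d.2 (m.toNat + n.toNat + 2) (r.1 + d.1) (r.2 + d.2) [] =
      (pvPath r d k, (pvRay r d (k+1)).1, (pvRay r d (k+1)).2) := by
  have hiff : ∀ p, (pvInb m n p ∧ pvB_cell R p.1 p.2 = 'O' ∧
      ¬ PySem.Set.contains placed p) ↔ pvIsO R m n S p := by
    intro p
    rw [pvB_cell_eq]
    have hcon : (PySem.Set.contains placed p = true) ↔ p ∈ S := by
      rw [PySem.Set.contains_iff]; exact hmm p
    unfold pvIsO
    tauto
  have hk' := pvKspec_congr (fun p => (hiff p).symm) hk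
  have h1 : (pvRay r d 1).1 = r.1 + d.1 := by simp [pvRay]
  have h2 : (pvRay r d 1).2 = r.2 + d.2 := by simp [pvRay]
  have := pvB_walk_spec R m n placed d r k hk' (m.toNat + n.toNat + 2) 0 [] (by omega)
    (by omega)
  rw [show (0:Nat) + 1 = 1 from rfl, h1, h2] at this
  rw [this]
  simp only [Nat.sub_zero, List.nil_append, Prod.mk.injEq, and_true]
  unfold pvPath
  apply List.map_congr_left
  intro t ht
  congr 1
  omega

theorem pvB_doDir_spec {R : List (List Char)} {m n : Int} {start : Int × Int}
    {S : Finset (Int × Int)} {placed : PySem.Set (Int × Int)} {chg : Bool} {r d : Int × Int}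
    (hr : r ∈ S) (hd : d ∈ pvA_dirs) (hst : pvBState R m n start S placed) :
    ∃ S', pvBState R m n start S' (pvB_doDir R m n r.1 r.2 (placed, chg) d).1 ∧ S ⊆ S' ∧
      (((pvB_doDir R m n r.1 r.2 (placed, chg) d).2 = chg ∧ S' = S ∧
        (∀ k, ¬ pvFlip R m n S r d k)) ∨
       ((pvB_doDir R m n r.1 r.2 (placed, chg) d).2 = true ∧ S ⊂ S')) := by
  obtain ⟨hnd, hmm, hinb, hstart, hsound⟩ := hst
  have hrinb : pvInb m n r := hinb r hr
  obtain ⟨k, hkb, hks⟩ := pvKspec_exists (P := pvIsO R m n S) hrinb (fun p hp => hp.1) hd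
  have hwalk := pvB_walk_run (placed := placed) hmm hrinb hd hks hkb
  unfold pvB_doDir
  simp only [hwalk]
  by_cases hg : pvPath r d k ≠ [] ∧ 0 ≤ (pvRay r d (k+1)).1 ∧ (pvRay r d (k+1)).1 < m ∧
      0 ≤ (pvRay r d (k+1)).2 ∧ (pvRay r d (k+1)).2 < n ∧
      (pvB_cell R (pvRay r d (k+1)).1 (pvRay r d (k+1)).2 = 'X' ∨
        PySem.Set.contains placed (pvRay r d (k+1)))
  · rw [if_pos hg]
    obtain ⟨hpne, ht1, ht2, ht3, ht4, htX⟩ := hg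
    have hk1 : 1 ≤ k := by
      rcases Nat.eq_zero_or_pos k with h0 | h0
      · exfalso; apply hpne; rw [h0]; rfl
      · exact h0
    have htinb : pvInb m n (pvRay r d (k+1)) := ⟨ht1, ht2, ht3, ht4⟩
    have hterm : pvA_cell R (pvRay r d (k+1)).1 (pvRay r d (k+1)).2 = 'X' ∨
        pvRay r d (k+1) ∈ S := by
      rcases htX with hX | hcon
      · exact Or.inl (by rw [← pvB_cell_eq]; exact hX)
      · exact Or.inr ((hmm _).1 ((PySem.Set.contains_iff _ _).1 hcon))
    have hcells : ∀ p ∈ pvPath r d k, pvInb m n p ∧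
        pvA_cell R p.1 p.2 = 'O' ∧ p ∉ S := by
      intro p hp
      obtain ⟨i, hi1, hi2, rfl⟩ := pvPath_mem.1 hp
      exact hks.1 i hi1 hi2
    refine ⟨S ∪ (pvPath r d k).toFinset, ?_, Finset.subset_union_left, Or.inr ⟨rfl, ?_⟩⟩
    · refine ⟨PySem.Set.nodup_update _ _ hnd, ?_, ?_, Finset.mem_union_left _ hstart, ?_⟩
      · intro p
        rw [PySem.Set.mem_update]
        constructor
        · rintro (hp | hp)
          · exact Finset.mem_union_left _ ((hmm p).1 hp)
          · exact Finset.mem_union_right _ (List.mem_toFinset.2 hp)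
        · intro hp
          rcases Finset.mem_union.1 hp with h | h
          · exact Or.inl ((hmm p).2 h)
          · exact Or.inr (List.mem_toFinset.1 h)
      · intro p hp
        rcases Finset.mem_union.1 hp with h | h
        · exact hinb p h
        · exact (hcells p (List.mem_toFinset.1 h)).1
      · intro C hC
        have hSC := hsound C hC
        have habs := pvRunAbsorb hC.2.1 hC.2.2 k r d (hSC hr) hd
          (fun i h1 h2 => ⟨(hks.1 i h1 h2).1, (hks.1 i h1 h2).2.1⟩) htinb
          (by rcases hterm with hX | hmem; exact Or.inl hX; exact Or.inr (hSC hmem))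
        intro p hp
        rcases Finset.mem_union.1 hp with h | h
        · exact hSC h
        · obtain ⟨i, hi1, hi2, rfl⟩ := pvPath_mem.1 (List.mem_toFinset.1 h)
          exact habs i hi1 hi2
    · rw [Finset.ssubset_iff_of_subset Finset.subset_union_left]
      refine ⟨pvRay r d 1, ?_, (hcells _ (pvPath_mem.2 ⟨1, le_rfl, hk1, rfl⟩)).2.2⟩
      exact Finset.mem_union_right _
        (List.mem_toFinset.2 (pvPath_mem.2 ⟨1, le_rfl, hk1, rfl⟩))
  · rw [if_neg hg]
    refine ⟨S, ⟨hnd, hmm, hinb, hstart, hsound⟩, Finset.Subset.refl S,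
      Or.inl ⟨rfl, rfl, ?_⟩⟩
    intro k' hfl
    obtain ⟨hks', hk1', hinb', hterm'⟩ := hfl
    have hkk : k' = k := pvKspec_unique hks' hks
    subst hkk
    apply hg
    refine ⟨?_, hinb'.1, hinb'.2.1, hinb'.2.2.1, hinb'.2.2.2, ?_⟩
    · intro hnil
      have := pvPath_length r d k'
      rw [hnil] at this
      simp at this
      omega
    · rcases hterm' with hX | hmem
      · exact Or.inl (by rw [pvB_cell_eq]; exact hX)
      · exact Or.inr ((PySem.Set.contains_iff _ _).2 ((hmm _).2 hmem))

theorem pvB_scan_aux {R : List (List Char)} {m n : Int} {start q : Int × Int}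
    {S : Finset (Int × Int)} :
    ∀ (l done : List (Int × Int)), pvA_dirs = done ++ l →
    ∀ (S1 : Finset (Int × Int)) (placed : PySem.Set (Int × Int)) (chg : Bool),
      pvBState R m n start S1 placed → q ∈ S1 → S ⊆ S1 →
      (chg = false → S1 = S ∧ ∀ d ∈ done, ∀ k, ¬ pvFlip R m n S q d k) →
      ∃ S2,
        pvBState R m n start S2 (l.foldl (pvB_doDir R m n q.1 q.2) (placed, chg)).1 ∧
        S1 ⊆ S2 ∧
        (chg = true → (l.foldl (pvB_doDir R m n q.1 q.2) (placed, chg)).2 = true) ∧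
        ((l.foldl (pvB_doDir R m n q.1 q.2) (placed, chg)).2 = false →
          chg = false ∧ S2 = S ∧ ∀ d ∈ done ++ l, ∀ k, ¬ pvFlip R m n S q d k) ∧
        (chg = false → (l.foldl (pvB_doDir R m n q.1 q.2) (placed, chg)).2 = true →
          S ⊂ S2) := by
  intro l
  induction l with
  | nil =>
    intro done heq S1 placed chg hst hq hsub hfd
    refine ⟨S1, hst, Finset.Subset.refl S1, fun h => h, ?_, ?_⟩
    · intro hres
      obtain ⟨h1, h2⟩ := hfd hres
      exact ⟨hres, h1, by simpa using h2⟩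
    · intro h1 h2
      rw [h1] at h2
      exact absurd h2 (by simp)
  | cons d0 l' ih =>
    intro done heq S1 placed chg hst hq hsub hfd
    have hd0 : d0 ∈ pvA_dirs := by rw [heq]; simp
    obtain ⟨S', hst', hsub', hcase⟩ := pvB_doDir_spec hq hd0 hst
    rcases hcase with ⟨hchg, hSeq, hnf⟩ | ⟨hchg, hss⟩
    · -- no flip in this direction
      have hpair : pvB_doDir R m n q.1 q.2 (placed, chg) d0 =
          ((pvB_doDir R m n q.1 q.2 (placed, chg) d0).1, chg) :=
        Prod.ext rfl hchg
      rw [hSeq] at hst'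
      have hside : chg = false → S1 = S ∧ ∀ d ∈ done ++ [d0], ∀ k,
          ¬ pvFlip R m n S q d k := by
        intro hcf
        obtain ⟨h1, h2⟩ := hfd hcf
        refine ⟨h1, ?_⟩
        intro d hdm
        rcases List.mem_append.1 hdm with h | h
        · exact h2 d h
        · rw [List.mem_singleton] at h
          subst h
          rw [← h1]
          exact hnf
      obtain ⟨S2, ha, hb, hc, hd, he⟩ := ih (done ++ [d0]) (by rw [heq]; simp) S1
        (pvB_doDir R m n q.1 q.2 (placed, chg) d0).1 chg hst' hq hsub hside
      refine ⟨S2, ?_, hb, ?_, ?_, ?_⟩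
      · rw [List.foldl_cons, hpair]; exact ha
      · intro h; rw [List.foldl_cons, hpair]; exact hc h
      · rw [List.foldl_cons, hpair]
        intro h
        obtain ⟨x1, x2, x3⟩ := hd h
        exact ⟨x1, x2, by simpa using x3⟩
      · intro h1 h2; rw [List.foldl_cons, hpair] at h2; exact he h1 h2
    · -- flipped: changed is true from here on
      have hpair : pvB_doDir R m n q.1 q.2 (placed, chg) d0 =
          ((pvB_doDir R m n q.1 q.2 (placed, chg) d0).1, true) :=
        Prod.ext rfl hchg
      obtain ⟨S2, ha, hb, hc, hd, he⟩ := ih (done ++ [d0]) (by rw [heq]; simp) S'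
        (pvB_doDir R m n q.1 q.2 (placed, chg) d0).1 true hst' (hsub' hq)
        (hsub.trans hsub') (by simp)
      refine ⟨S2, ?_, hsub'.trans hb, ?_, ?_, ?_⟩
      · rw [List.foldl_cons, hpair]; exact ha
      · intro _; rw [List.foldl_cons, hpair]; exact hc rfl
      · rw [List.foldl_cons, hpair]
        intro h
        exact absurd (hc rfl) (by rw [h]; simp)
      · intro h1 _
        have : S ⊂ S' := by
          rcases hfd h1 with ⟨hS1S, _⟩
          rw [← hS1S]
          exact hss
        exact this.trans_subset hb

theorem pvB_scanCell_spec {R : List (List Char)} {m n : Int} {start : Int × Int}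
    {S S1 : Finset (Int × Int)} {placed : PySem.Set (Int × Int)} {chg : Bool} {r c : Int}
    (hst : pvBState R m n start S1 placed) (hsub : S ⊆ S1)
    (hfalse : chg = false → S1 = S) :
    ∃ S2, pvBState R m n start S2 (pvB_scanCell R m n (placed, chg) r c).1 ∧ S1 ⊆ S2 ∧
      (chg = true → (pvB_scanCell R m n (placed, chg) r c).2 = true) ∧
      ((pvB_scanCell R m n (placed, chg) r c).2 = false → chg = false ∧ S2 = S ∧
        ((r, c) ∈ S → ∀ d ∈ pvA_dirs, ∀ k, ¬ pvFlip R m n S (r, c) d k)) ∧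
      (chg = false → (pvB_scanCell R m n (placed, chg) r c).2 = true → S ⊂ S2) := by
  unfold pvB_scanCell
  by_cases hcon : PySem.Set.contains placed (r, c) = true
  · rw [if_pos hcon]
    have hqS1 : (r, c) ∈ S1 := (hst.2.1 _).1 ((PySem.Set.contains_iff _ _).1 hcon)
    have hfd : chg = false → S1 = S ∧ ∀ d ∈ ([] : List (Int × Int)), ∀ k,
        ¬ pvFlip R m n S (r, c) d k := by
      intro h
      exact ⟨hfalse h, by simp⟩
    obtain ⟨S2, ha, hb, hc, hd, he⟩ := pvB_scan_aux (q := (r, c)) (S := S) pvA_dirs [] rfl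
      S1 placed chg hst hqS1 hsub hfd
    rw [pvB_dirs_eq]
    refine ⟨S2, ha, hb, hc, ?_, he⟩
    intro h
    obtain ⟨x1, x2, x3⟩ := hd h
    exact ⟨x1, x2, fun _ => by simpa using x3⟩
  · rw [if_neg hcon]
    refine ⟨S1, hst, Finset.Subset.refl S1, fun h => h, ?_, ?_⟩
    · intro hres
      refine ⟨hres, hfalse hres, ?_⟩
      intro hrc
      exact absurd ((PySem.Set.contains_iff _ _).2 ((hst.2.1 _).2 (hsub hrc))) hcon
    · intro h1 h2
      rw [h1] at h2
      exact absurd h2 (by simp)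

theorem pvFoldPrefix {σ : Type} (g : σ → (Int × Int) → σ)
    (I : List (Int × Int) → σ → Prop) :
    ∀ (l pre : List (Int × Int)) (st : σ), I pre st →
      (∀ pre' x st', x ∈ l → I pre' st' → I (pre' ++ [x]) (g st' x)) →
      I (pre ++ l) (l.foldl g st) := by
  intro l
  induction l with
  | nil => intro pre st h _; simpa using h
  | cons x t ih =>
    intro pre st h hstep
    have h1 := hstep pre x st (by simp) h
    have := ih (pre ++ [x]) (g st x) h1 (fun p y s hy hI => hstep p y s (by simp [hy]) hI)
    simpa [List.append_assoc] using this

theorem pvFoldFlat {α σ : Type} (l : List α) (f : α → List (Int × Int))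
    (g : σ → (Int × Int) → σ) (init : σ) :
    l.foldl (fun st r => (f r).foldl g st) init = (l.flatMap f).foldl g init := by
  induction l generalizing init with
  | nil => rfl
  | cons x t ih => simp [List.foldl_append, ih]

def pvCells (m n : Int) : List (Int × Int) :=
  (PySem.List.pyRange 0 m 1).flatMap (fun r =>
    (PySem.List.pyRange 0 n 1).map (fun c => (r, c)))

theorem pvCells_mem {m n : Int} {p : Int × Int} : p ∈ pvCells m n ↔ pvInb m n p := by
  unfold pvCells pvInb
  simp only [List.mem_flatMap, List.mem_map, PySem.List.mem_pyRange_one]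
  constructor
  · rintro ⟨r, hr, c, hc, rfl⟩
    exact ⟨hr.1, hr.2, hc.1, hc.2⟩
  · rintro ⟨h1, h2, h3, h4⟩
    exact ⟨p.1, ⟨h1, h2⟩, p.2, ⟨h3, h4⟩, rfl⟩

theorem pvB_round_eq (R : List (List Char)) (m n : Int) (placed : PySem.Set (Int × Int)) :
    pvB_round R m n placed =
      (pvCells m n).foldl (fun st rc => pvB_scanCell R m n st rc.1 rc.2) (placed, false) := by
  unfold pvB_round pvCells
  rw [← pvFoldFlat]
  apply PySem.List.foldl_congr_mem
  intro acc r _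
  rw [List.foldl_map]

theorem pvB_round_spec {R : List (List Char)} {m n : Int} {start : Int × Int}
    {S : Finset (Int × Int)} {placed : PySem.Set (Int × Int)}
    (hst : pvBState R m n start S placed) :
    ∃ S', pvBState R m n start S' (pvB_round R m n placed).1 ∧ S ⊆ S' ∧
      ((pvB_round R m n placed).2 = false → S' = S ∧ pvClosed R m n S') ∧
      ((pvB_round R m n placed).2 = true → S ⊂ S') := by
  rw [pvB_round_eq]
  have hinv := pvFoldPrefix (fun st rc => pvB_scanCell R m n st rc.1 rc.2)
    (fun pre st => ∃ S1, pvBState R m n start S1 st.1 ∧ S ⊆ S1 ∧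
      (st.2 = false → S1 = S ∧ ∀ q ∈ pre, q ∈ S → ∀ d ∈ pvA_dirs, ∀ k,
        ¬ pvFlip R m n S q d k) ∧
      (st.2 = true → S ⊂ S1))
    (pvCells m n) [] (placed, false)
    ⟨S, hst, Finset.Subset.refl S, fun _ => ⟨rfl, by simp⟩, by simp⟩
    ?_
  · rw [List.nil_append] at hinv
    obtain ⟨S1, ha, hb, hc, hd⟩ := hinv
    refine ⟨S1, ha, hb, ?_, hd⟩
    intro hres
    obtain ⟨h1, h2⟩ := hc hres
    subst h1
    refine ⟨rfl, ?_⟩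
    intro s hs d hd' k hfl
    have hsinb : pvInb m n s := ha.2.2.1 s hs
    exact h2 s (pvCells_mem.2 hsinb) hs d hd' k hfl
  · rintro pre' ⟨xr, xc⟩ st' _ ⟨S1, ha, hb, hc, hd⟩
    obtain ⟨S2, h1, h2, h3, h4, h5⟩ := pvB_scanCell_spec (r := xr) (c := xc)
      (chg := st'.2) (by simpa using ha) hb (fun h => (hc h).1)
    have hpair : (st'.1, st'.2) = st' := rfl
    rw [hpair] at h3 h4 h5
    refine ⟨S2, h1, hb.trans h2, ?_, ?_⟩
    · intro hres
      obtain ⟨x1, x2, x3⟩ := h4 hres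
      refine ⟨x2, ?_⟩
      intro q hq hqS d hdm k
      rcases List.mem_append.1 hq with h | h
      · exact (hc x1).2 q h hqS d hdm k
      · rw [List.mem_singleton] at h
        subst h
        exact x3 hqS d hdm k
    · intro hres
      cases hchg : st'.2 with
      | false => exact h5 hchg hres
      | true => exact (hd hchg).trans_subset h2

theorem pvB_settle_spec {R : List (List Char)} {m n : Int} {start : Int × Int} :
    ∀ (fuel : Nat) (S : Finset (Int × Int)) (placed : PySem.Set (Int × Int)),
      pvBState R m n start S placed →
      (m.toNat * n.toNat + 1 - S.card) < fuel →
      ∃ Sf, pvGood R m n start Sf ∧ (∀ C, pvGood R m n start C → Sf ⊆ C) ∧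
        pvB_settle R m n fuel placed = (Sf.card : Int) - 1 := by
  intro fuel
  induction fuel with
  | zero => intro S placed _ hm; omega
  | succ f ih =>
    intro S placed hst hm
    obtain ⟨S', hst', hsub', hfalse, htrue⟩ := pvB_round_spec hst
    have heval : pvB_settle R m n (f+1) placed =
        (if (pvB_round R m n placed).2 then pvB_settle R m n f (pvB_round R m n placed).1
         else ((pvB_round R m n placed).1.length : Int) - 1) := rfl
    rw [heval]
    by_cases hchg : (pvB_round R m n placed).2 = true
    · rw [hchg, if_pos rfl]
      have hss := htrue hchg
      have hlt := Finset.card_lt_card hss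
      have hle : S'.card ≤ m.toNat * n.toNat := pvCard_le hst'.2.2.1
      exact ih S' (pvB_round R m n placed).1 hst' (by omega)
    · rw [Bool.not_eq_true] at hchg
      rw [hchg, if_neg (by simp)]
      obtain ⟨hSeq, hclosed⟩ := hfalse hchg
      have hlen : (pvB_round R m n placed).1.length = S'.card :=
        pvLenCard hst'.1 hst'.2.1
      refine ⟨S', ⟨hst'.2.2.2.1, hst'.2.2.1, hclosed⟩, hst'.2.2.2.2, ?_⟩
      rw [hlen]

theorem pvStart_eq {R : List (List Char)} {m n : Int} (ctx : pvCtx R m n) {i j : Int}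
    (hinb : pvInb m n (i, j)) :
    pvA_bfs m n (m.toNat * n.toNat + 2) (pvA_set R i j 'X') [(i, j)] 0 =
      pvB_settle R m n (m.toNat * n.toNat + 2) (PySem.Set.ofList [(i, j)]) := by
  have hrep : pvRep R m n {(i, j)} (pvA_set R i j 'X') := by
    have := pvRep_set ctx (pvRep_init R m n) hinb
    simpa using this
  have hstA : pvAState R m n (i, j) {(i, j)} (pvA_set R i j 'X', [(i, j)], 0) := by
    refine ⟨hrep, by simp, ?_, ?_, Finset.mem_singleton_self _, ?_⟩
    · intro p hp
      rw [List.mem_singleton] at hp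
      simp [hp]
    · intro p hp
      rw [Finset.mem_singleton] at hp
      rwa [hp]
    · intro C hC
      rw [Finset.singleton_subset_iff]
      exact hC.1
  have hhang : pvHang R m n {(i, j)} [(i, j)] := by
    intro s hs hnot
    rw [Finset.mem_singleton] at hs
    exact absurd (by simp [hs]) hnot
  obtain ⟨SfA, hgoodA, hleastA, hevalA⟩ := pvA_bfs_spec ctx (m.toNat * n.toNat + 2)
    {(i, j)} (pvA_set R i j 'X') [(i, j)] 0 hstA hhang (by simp only [Finset.card_singleton, List.length_cons, List.length_nil]; omega)
  have hstB : pvBState R m n (i, j) {(i, j)} (PySem.Set.ofList [(i, j)]) := by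
    refine ⟨PySem.Set.nodup_ofList _, ?_, ?_, Finset.mem_singleton_self _, ?_⟩
    · intro p
      rw [PySem.Set.mem_ofList, List.mem_singleton, Finset.mem_singleton]
    · intro p hp
      rw [Finset.mem_singleton] at hp
      rwa [hp]
    · intro C hC
      rw [Finset.singleton_subset_iff]
      exact hC.1
  obtain ⟨SfB, hgoodB, hleastB, hevalB⟩ := pvB_settle_spec (m.toNat * n.toNat + 2)
    {(i, j)} (PySem.Set.ofList [(i, j)]) hstB (by simp only [Finset.card_singleton]; omega)
  rw [hevalA, hevalB, pvUnique hgoodA hleastA hgoodB hleastB]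

theorem pvMain (cb : List String) (hpre : Pre_flip_chess cb) :
    flip_chess cb = flip_chess_alt cb := by
  obtain ⟨hne, hlen⟩ := hpre
  have hhead : (cb.map String.toList).headD [] = (cb.headD "").toList := by
    cases cb with
    | nil => exact absurd rfl hne
    | cons x l => rfl
  have hctx : pvCtx (cb.map String.toList) ((cb.map String.toList).length : Int)
      (((cb.map String.toList).headD []).length : Int) := by
    refine ⟨rfl, by positivity, ?_⟩
    intro i hi
    have hi' : i < cb.length := by simpa using hi
    have hgetD : ((cb.map String.toList).getD i []) = (cb.getD i "").toList := by
      rw [List.getD_eq_getElem?_getD, List.getD_eq_getElem?_getD, List.getElem?_map,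
        List.getElem?_eq_getElem hi']
      rfl
    have hmem : cb.getD i "" ∈ cb := by
      rw [List.getD_eq_getElem?_getD, List.getElem?_eq_getElem hi']
      exact List.getElem_mem hi'
    have := hlen _ hmem
    rw [PySem.Str.len_eq, PySem.Str.len_eq] at this
    rw [hgetD, hhead]
    simp only [String.length_toList]
    exact_mod_cast this
  simp only [flip_chess, flip_chess_alt]
  apply PySem.List.foldl_congr_mem
  intro acc i hi
  apply PySem.List.foldl_congr_mem
  intro acc2 j hj
  rw [PySem.List.mem_pyRange_one] at hi hj
  rw [pvB_cell_eq]
  by_cases hdot : pvA_cell (cb.map String.toList) i j = '.'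
  · rw [if_pos hdot, if_pos hdot]
    refine congrArg _ (pvStart_eq hctx ?_)
    exact ⟨hi.1, hi.2, hj.1, hj.2⟩
  · rw [if_neg hdot, if_neg hdot]

-- ===== VERDICT (by name: the statement is the Claim_ definition above) =====
theorem flip_chess_spec : Claim_equal_flip_chess := by
  intro chessboard _ hpre
  exact pvMain chessboard hpre
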